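-- pv_equiv track=rewrite | github.com/JuanPabloSGU/ITI1120---Introduction-To-Computing | Assingments_ITI1120/Assignment_4/a4_part1.py | max_anagram
-- ===== SOURCE A (Python) =====
-- def max_anagram(l, anagcount):
--     '''(list of str, list of int) -> list of str
--     - l is a list of words (with no words duplicated)
--     - anagcount is a list of integers where i-th integer in the list
--     represents the number of anagrams in wordbook of the i-th word in l.
--
--     The function returns a (lexicographicaly sorted) list of all the words
--     in l with maximum number of anagrams (in wordbook as recorded in anagcount)
--
--     >>> max_anagram(["listen","care", "item", "year", "race", "ear"], [3, 2, 3, 0, 2, 2])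
--     ['item', 'listen']
--     '''
--
--     #YOUR CODE GOES HERE
--     x = max(anagcount) # Finding the max value of the anagcount
--
--     #Similar to the process in k_anagram
--     max_anagram = []
--     j = 0
--
--     for i in anagcount:
--         if i == x:
--             max_anagram.append(l[j])
--
--         j+=1
--
--     max_anagram.sort()
--
--     return max_anagram
-- ===== SOURCE B (Python) =====
-- def max_anagram(l, anagcount):
--     best = []
--     cur = None
--     for j, c in enumerate(anagcount):
--         if cur is None or c > cur:
--             best = [l[j]]
--             cur = c
--         elif c == cur:
--             best.append(l[j])
--     best.sort()
--     return best
-- ===== Notes on version B (the rewrite author's own statement) =====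
-- stated objective: alternative
-- what changed: Single pass over enumerate(anagcount) maintaining the running maximum and the current best list, instead of computing max(anagcount) first and then filtering in a second loop with a manual counter.
import Mathlib
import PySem

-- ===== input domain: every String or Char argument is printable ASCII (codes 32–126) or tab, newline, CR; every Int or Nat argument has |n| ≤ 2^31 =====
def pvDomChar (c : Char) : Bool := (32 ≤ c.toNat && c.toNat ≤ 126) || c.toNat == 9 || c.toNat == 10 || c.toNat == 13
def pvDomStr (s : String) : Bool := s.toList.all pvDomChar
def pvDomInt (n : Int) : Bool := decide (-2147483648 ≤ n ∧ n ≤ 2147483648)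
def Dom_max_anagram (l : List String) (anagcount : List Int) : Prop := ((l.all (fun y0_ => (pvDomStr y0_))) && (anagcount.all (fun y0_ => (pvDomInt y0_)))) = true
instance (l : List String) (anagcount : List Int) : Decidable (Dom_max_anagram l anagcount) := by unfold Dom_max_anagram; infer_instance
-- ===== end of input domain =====

-- B replaces A's "compute max, then filter with a manual counter" by a single pass over
-- enumerate(anagcount) maintaining the running maximum and current best list (alternative
-- decomposition, same asymptotic cost).


-- ===== PORT A =====
-- x = max(anagcount); loop over anagcount with counter j appending l[j] when i == x; sort.
-- l[j] is ported as pyGetD (exact under Pre_, which keeps every appended index in range).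
def max_anagram (l : List String) (anagcount : List Int) : List String :=
  let x : Int := (PySem.List.max? anagcount (fun y => y)).getD 0
  let st := anagcount.foldl
    (fun (st : List String × Int) i =>
      (if i = x then st.1 ++ [PySem.List.pyGetD l st.2 ""] else st.1, st.2 + 1))
    ([], 0)
  PySem.List.sorted st.1 (fun y => y)

-- ===== PORT B =====
-- single pass: best/cur state over enumerate(anagcount); cur=None until the first element.
def max_anagram_alt (l : List String) (anagcount : List Int) : List String :=
  let st := (PySem.List.enumerate anagcount).foldl
    (fun (st : List String × Option Int) jc =>
      match st.2 with
      | none => ([PySem.List.pyGetD l jc.1 ""], some jc.2)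
      | some cur =>
        if jc.2 > cur then ([PySem.List.pyGetD l jc.1 ""], some jc.2)
        else if jc.2 = cur then (st.1 ++ [PySem.List.pyGetD l jc.1 ""], some cur)
        else st)
    ([], none)
  PySem.List.sorted st.1 (fun y => y)

-- ===== PRECONDITION & SPEC =====
-- Pre_ = exactly where Python A returns: anagcount nonempty (else max([]) raises ValueError)
-- and every index holding the maximal count is a valid index of l (else l[j] raises IndexError).
def Pre_max_anagram (l : List String) (anagcount : List Int) : Prop :=
  anagcount ≠ [] ∧ ∀ i < anagcount.length, l.length ≤ i →
    ∃ k < anagcount.length, anagcount.getD i 0 < anagcount.getD k 0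
instance (l : List String) (anagcount : List Int) : Decidable (Pre_max_anagram l anagcount) := by unfold Pre_max_anagram; infer_instance
def pvWitness_max_anagram : List String × List Int :=
  (["listen", "care", "item", "year", "race", "ear"], [3, 2, 3, 0, 2, 2])

def Spec_max_anagram (l : List String) (anagcount : List Int) (out : List String) : Prop := out = max_anagram_alt l anagcount
instance (l : List String) (anagcount : List Int) (out : List String) : Decidable (Spec_max_anagram l anagcount out) := by unfold Spec_max_anagram; infer_instance

-- ===== CLAIM (what is proved, stated in full; the proofs are below) =====
def Claim_equal_max_anagram : Prop := ∀ (l : List String) (anagcount : List Int), Dom_max_anagram l anagcount → Pre_max_anagram l anagcount → Spec_max_anagram l anagcount (max_anagram l anagcount)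

-- ===== LEMMAS AND PROOFS =====

-- the list of words at positions (counted from j) whose count equals x, in order
def pvCollect (l : List String) (as : List Int) (j : Int) (x : Int) : List String :=
  match as with
  | [] => []
  | a :: t => (if a = x then [PySem.List.pyGetD l j ""] else []) ++ pvCollect l t (j + 1) x

lemma pvLoopA (l : List String) (as : List Int) (x : Int) (acc : List String) (j : Int) :
    (as.foldl
      (fun (st : List String × Int) i =>
        (if i = x then st.1 ++ [PySem.List.pyGetD l st.2 ""] else st.1, st.2 + 1))
      (acc, j)).1 = acc ++ pvCollect l as j x := by
  induction as generalizing acc j with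
  | nil => simp [pvCollect]
  | cons a t ih =>
    simp only [List.foldl_cons, pvCollect]
    by_cases h : a = x <;> simp [h, ih, List.append_assoc]

lemma le_max_foldl_init (as : List Int) (m : Int) : m ≤ as.foldl max m := by
  induction as generalizing m with
  | nil => simp
  | cons a t ih => exact le_trans (le_max_left m a) (ih (max m a))

lemma pvLoopB (l : List String) (as : List Int) (j : Int) (acc : List String) (m : Int) :
    ((PySem.List.enumerate as j).foldl
      (fun (st : List String × Option Int) jc =>
        match st.2 with
        | none => ([PySem.List.pyGetD l jc.1 ""], some jc.2)
        | some cur =>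
          if jc.2 > cur then ([PySem.List.pyGetD l jc.1 ""], some jc.2)
          else if jc.2 = cur then (st.1 ++ [PySem.List.pyGetD l jc.1 ""], some cur)
          else st)
      (acc, some m)) =
    ((if as.foldl max m = m then acc else []) ++ pvCollect l as j (as.foldl max m),
      some (as.foldl max m)) := by
  induction as generalizing j acc m with
  | nil => simp [pvCollect]
  | cons a t ih =>
    simp only [PySem.List.enumerate_cons, List.foldl_cons, gt_iff_lt] at ih ⊢
    rcases lt_trichotomy m a with h | h | h
    · rw [if_pos h, ih]
      have hle : a ≤ t.foldl max a := le_max_foldl_init t a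
      have hmax : max m a = a := max_eq_right (le_of_lt h)
      simp only [List.foldl_cons, hmax, pvCollect]
      have hM : ¬ (t.foldl max a = m) := by omega
      have ham : ¬ (a = m) := by omega
      by_cases hA : t.foldl max a = a
      · simp [hM, hA, ham]
      · have hA' : ¬ (a = t.foldl max a) := fun hh => hA hh.symm
        simp [hM, hA, hA']
    · subst h
      rw [if_neg (lt_irrefl m), if_pos rfl, ih]
      simp only [List.foldl_cons, max_self, pvCollect]
      by_cases hM : t.foldl max m = m
      · simp [hM]
      · have hM' : ¬ (m = t.foldl max m) := fun hh => hM hh.symm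
        simp [hM, hM']
    · rw [if_neg (not_lt_of_gt h), if_neg (ne_of_lt h), ih]
      have hle : m ≤ t.foldl max m := le_max_foldl_init t m
      have hmax : max m a = m := max_eq_left (le_of_lt h)
      simp only [List.foldl_cons, hmax, pvCollect]
      have hA : ¬ (a = t.foldl max m) := by omega
      simp [hA]

-- ===== VERDICT (by name: the statement is the Claim_ definition above) =====
theorem max_anagram_spec : Claim_equal_max_anagram := by
  intro l anagcount _ hpre
  obtain ⟨hne, -⟩ := hpre
  unfold Spec_max_anagram max_anagram max_anagram_alt
  obtain ⟨a, t, rfl⟩ := List.exists_cons_of_ne_nil hne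
  simp only [PySem.List.max?_id_cons, Option.getD_some, PySem.List.enumerate_cons,
    List.foldl_cons]
  rw [pvLoopA, pvLoopB]
  by_cases hA : t.foldl max a = a
  · simp [pvCollect, hA]
  · have hA' : ¬ (a = t.foldl max a) := fun hh => hA hh.symm
    simp [pvCollect, hA, hA']
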